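-- pv_equiv track=rewrite | github.com/kwoncy2020/nystagmus-tool | my_feature_extractor.py | spread_none_with_n_step
-- ===== SOURCE A (Python) =====
-- import os, cv2, copy, time
--
-- def spread_none_with_n_step(list_, n=2) -> list:
--     if not isinstance(list_,list):
--         raise Exception("the input should be a instance of list")
--     if n < 1:
--         return list_
--
--     list_ = copy.deepcopy(list_)
--     nones = []
--     for i in range(0,len(list_)):
--         if list_[i] == None:
--             nones.append(i)
--
--     for i in nones:
--         left_index = max(0, i-n)
--         right_index = min(len(list_)-1, i+n)
--         n_inners = right_index - left_index + 1
--         list_[max(0,i-n):min(len(list_)-1,i+n)+1] = [None] * n_inners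
--
--     return list_
-- ===== SOURCE B (Python) =====
-- def spread_none_with_n_step(list_, n=2) -> list:
--     if n < 1:
--         return list_
--     L = len(list_)
--     # difference array over index intervals, then one prefix-sum pass
--     diff = [0] * (L + 1)
--     for i, v in enumerate(list_):
--         if v is None:
--             diff[max(0, i - n)] += 1
--             diff[min(L, i + n + 1)] -= 1
--     out = []
--     acc = 0
--     for i, v in enumerate(list_):
--         acc += diff[i]
--         out.append(None if acc > 0 else v)
--     return out
-- ===== Notes on version B (the rewrite author's own statement) =====
-- stated objective: faster
-- what changed: A paints a [i-n, i+n] slice of Nones around every original None (O(len*n) writes); B marks each interval's endpoints in a difference array and decides every position with one prefix-sum pass (O(len)).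
import Mathlib
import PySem

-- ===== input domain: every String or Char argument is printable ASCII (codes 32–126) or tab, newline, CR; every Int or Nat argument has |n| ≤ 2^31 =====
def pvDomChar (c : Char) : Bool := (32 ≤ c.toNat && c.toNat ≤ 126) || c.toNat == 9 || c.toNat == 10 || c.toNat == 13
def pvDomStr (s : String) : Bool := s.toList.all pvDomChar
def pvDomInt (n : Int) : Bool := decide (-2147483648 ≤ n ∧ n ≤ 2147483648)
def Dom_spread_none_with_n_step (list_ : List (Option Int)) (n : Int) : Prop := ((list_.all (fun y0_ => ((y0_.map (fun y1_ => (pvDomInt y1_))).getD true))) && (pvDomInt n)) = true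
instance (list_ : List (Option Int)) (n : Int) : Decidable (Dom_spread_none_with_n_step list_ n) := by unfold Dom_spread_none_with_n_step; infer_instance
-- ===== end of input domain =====

-- B replaces A's per-None slice painting by a difference array over the intervals plus one
-- prefix-sum pass (asymptotically fewer writes; objective: faster).

-- ===== PORT A =====
-- one iteration of A's second loop: the Python slice assignment
-- list_[max(0,i-n):min(len(list_)-1,i+n)+1] = [None]*n_inners, ported by hand as
-- take ++ replicate ++ drop; exact here since 0 ≤ left ≤ right+1 ≤ len(list_).
def pvAssignA (n : Int) (l : List (Option Int)) (i : Int) : List (Option Int) :=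
  let left_index := max 0 (i - n)
  let right_index := min ((l.length : Int) - 1) (i + n)
  let n_inners := right_index - left_index + 1
  l.take left_index.toNat ++ List.replicate n_inners.toNat none ++ l.drop (right_index + 1).toNat

def spread_none_with_n_step (list_ : List (Option Int)) (n : Int) : List (Option Int) :=
  if n < 1 then list_
  else
    -- first loop: collect the indices of the Nones (list_[i] read via pyGetD; i is in range)
    let nones := (PySem.List.pyRange 0 (list_.length : Int) 1).foldl
      (fun acc i => if PySem.List.pyGetD list_ i (some 0) = none then acc ++ [i] else acc) []
    -- second loop: paint [max(0,i-n), min(len-1,i+n)] with None for each collected i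
    nones.foldl (pvAssignA n) list_

-- ===== PORT B =====
-- Python 'd[k] += δ' with k in range, ported by hand via List.set (exact for k < d.length)
def pvBump (d : List Int) (k : Nat) (δ : Int) : List Int := d.set k (d.getD k 0 + δ)

def spread_none_with_n_step_alt (list_ : List (Option Int)) (n : Int) : List (Option Int) :=
  if n < 1 then list_
  else
    let L : Int := (list_.length : Int)
    let diff := (PySem.List.enumerate list_ 0).foldl
      (fun d p => if p.2 = none then
          pvBump (pvBump d (max 0 (p.1 - n)).toNat 1) (min L (p.1 + n + 1)).toNat (-1)
        else d)
      (List.replicate (list_.length + 1) 0)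
    ((PySem.List.enumerate list_ 0).foldl
      (fun st p =>
        let acc := st.1 + diff.getD p.1.toNat 0
        (acc, st.2 ++ [if acc > 0 then none else p.2]))
      ((0 : Int), ([] : List (Option Int)))).2

-- ===== PRECONDITION & SPEC =====
def Spec_spread_none_with_n_step (list_ : List (Option Int)) (n : Int) (out : List (Option Int)) : Prop := out = spread_none_with_n_step_alt list_ n
instance (list_ : List (Option Int)) (n : Int) (out : List (Option Int)) : Decidable (Spec_spread_none_with_n_step list_ n out) := by unfold Spec_spread_none_with_n_step; infer_instance

-- ===== CLAIM (what is proved, stated in full; the proofs are below) =====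
def Claim_equal_spread_none_with_n_step : Prop := ∀ (list_ : List (Option Int)) (n : Int), Dom_spread_none_with_n_step list_ n → Spec_spread_none_with_n_step list_ n (spread_none_with_n_step list_ n)

-- ===== LEMMAS AND PROOFS =====

-- "position j is within n of an original None"
def pvCov (list_ : List (Option Int)) (n : Int) (j : Nat) : Bool :=
  (List.range list_.length).any
    (fun k => list_[k]? == some none && decide ((k : Int) - n ≤ (j : Int)) && decide ((j : Int) ≤ (k : Int) + n))

lemma pvCov_iff (list_ : List (Option Int)) (n : Int) (j : Nat) :
    pvCov list_ n j = true ↔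
      ∃ k : Nat, k < list_.length ∧ list_[k]? = some none ∧
        (k : Int) - n ≤ (j : Int) ∧ (j : Int) ≤ (k : Int) + n := by
  simp only [pvCov, List.any_eq_true, List.mem_range, Bool.and_eq_true, decide_eq_true_eq,
    beq_iff_eq]
  constructor
  · rintro ⟨k, hk, ⟨h1, h2⟩, h3⟩; exact ⟨k, hk, h1, by omega, by omega⟩
  · rintro ⟨k, hk, h1, h2, h3⟩; exact ⟨k, hk, ⟨h1, by omega⟩, by omega⟩

-- sum of the first s entries of a list of Ints
def pvPS (d : List Int) (s : Nat) : Int := (d.take s).sum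

lemma pvPS_succ (d : List Int) (s : Nat) : pvPS d (s + 1) = pvPS d s + d.getD s 0 := by
  simp only [pvPS, List.take_add_one, List.sum_append, List.getD_eq_getElem?_getD]
  cases h : d[s]? <;> simp

lemma pvPS_replicate_zero (m s : Nat) : pvPS (List.replicate m 0) s = 0 := by
  simp [pvPS, List.take_replicate]

lemma pvBump_length (d : List Int) (k : Nat) (δ : Int) : (pvBump d k δ).length = d.length := by
  simp [pvBump]

lemma pvPS_bump (d : List Int) (k : Nat) (δ : Int) (hk : k < d.length) (s : Nat) :
    pvPS (pvBump d k δ) s = pvPS d s + if k < s then δ else 0 := by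
  induction s with
  | zero => simp [pvPS]
  | succ s ih =>
    rw [pvPS_succ, pvPS_succ, ih]
    have hg : (pvBump d k δ).getD s 0 = if k = s then d.getD s 0 + δ else d.getD s 0 := by
      by_cases hks : k = s
      · subst hks
        simp [pvBump, List.getD_eq_getElem?_getD, hk]
      · simp [pvBump, List.getD_eq_getElem?_getD, hks]
    rw [hg]
    split_ifs <;> omega

-- generic slice-assignment lemmas
lemma setRange_getElem? (l : List (Option Int)) (a b : Nat) (hab : a ≤ b) (hbL : b ≤ l.length)
    (j : Nat) :
    (l.take a ++ List.replicate (b - a) (none : Option Int) ++ l.drop b)[j]? =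
      if a ≤ j ∧ j < b then some none else l[j]? := by
  rcases lt_or_ge j a with hja | hja
  · rw [List.getElem?_append_left (by simp; omega),
      List.getElem?_append_left (by simp; omega), List.getElem?_take]
    rw [if_pos hja, if_neg (by omega)]
  · rcases lt_or_ge j b with hjb | hjb
    · rw [List.getElem?_append_left (by simp; omega),
        List.getElem?_append_right (by simp; omega)]
      rw [if_pos ⟨by omega, hjb⟩]
      simp [List.getElem?_replicate]
      omega
    · rw [List.getElem?_append_right (by simp; omega), List.getElem?_drop]
      rw [if_neg (by omega)]
      congr 1
      simp
      omega

lemma pvAssignA_length (n : Int) (l : List (Option Int)) (i : Int) (hn : ¬ n < 1)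
    (h0 : 0 ≤ i) (hi : i < (l.length : Int)) :
    (pvAssignA n l i).length = l.length := by
  simp only [pvAssignA]
  simp
  omega

lemma pvAssignA_getElem? (n : Int) (l : List (Option Int)) (i : Int) (hn : ¬ n < 1)
    (h0 : 0 ≤ i) (hi : i < (l.length : Int)) (j : Nat) :
    (pvAssignA n l i)[j]? =
      if i - n ≤ (j : Int) ∧ (j : Int) ≤ i + n ∧ j < l.length then some none else l[j]? := by
  simp only [pvAssignA]
  have hrepl : (min ((l.length : Int) - 1) (i + n) - max 0 (i - n) + 1).toNat
      = (min ((l.length : Int) - 1) (i + n) + 1).toNat - (max 0 (i - n)).toNat := by omega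
  rw [hrepl, setRange_getElem? l _ _ (by omega) (by omega)]
  split_ifs with h1 h2 h2 <;> first | rfl | (exfalso; omega)

lemma foldA (n : Int) (hn : ¬ n < 1) :
    ∀ (S : List Int) (l : List (Option Int)), (∀ i ∈ S, 0 ≤ i ∧ i < (l.length : Int)) →
      (S.foldl (pvAssignA n) l).length = l.length ∧
      ∀ j : Nat, (S.foldl (pvAssignA n) l)[j]? =
        if (∃ i ∈ S, i - n ≤ (j : Int) ∧ (j : Int) ≤ i + n) ∧ j < l.length then some none
        else l[j]? := by
  intro S
  induction S with
  | nil => intro l _; simp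
  | cons i S ih =>
    intro l hmem
    have hi := hmem i (List.mem_cons_self ..)
    have hlen := pvAssignA_length n l i hn hi.1 hi.2
    have hmem' : ∀ x ∈ S, 0 ≤ x ∧ x < ((pvAssignA n l i).length : Int) := by
      intro x hx
      rw [hlen]
      exact hmem x (List.mem_cons_of_mem _ hx)
    obtain ⟨ihlen, ihget⟩ := ih (pvAssignA n l i) hmem'
    refine ⟨by rw [List.foldl_cons, ihlen, hlen], ?_⟩
    intro j
    rw [List.foldl_cons, ihget j, hlen, pvAssignA_getElem? n l i hn hi.1 hi.2 j]
    by_cases hj : j < l.length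
    · by_cases hS : ∃ x ∈ S, x - n ≤ (j : Int) ∧ (j : Int) ≤ x + n
      · rw [if_pos ⟨hS, hj⟩]
        rw [if_pos ⟨⟨_, List.mem_cons_of_mem _ hS.choose_spec.1, hS.choose_spec.2⟩, hj⟩]
      · rw [if_neg (fun h => hS h.1)]
        by_cases hhd : i - n ≤ (j : Int) ∧ (j : Int) ≤ i + n
        · rw [if_pos ⟨hhd.1, hhd.2, hj⟩, if_pos ⟨⟨i, List.mem_cons_self .., hhd⟩, hj⟩]
        · rw [if_neg (fun h => hhd ⟨h.1, h.2.1⟩), if_neg ?_]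
          rintro ⟨⟨x, hx, hxj⟩, -⟩
          rcases List.mem_cons.mp hx with rfl | hx'
          · exact hhd hxj
          · exact hS ⟨x, hx', hxj⟩
    · rw [if_neg (fun h => hj h.2), if_neg (fun h => hj h.2.2), if_neg (fun h => hj h.2)]

-- characterisation of A's result
lemma A_getElem? (list_ : List (Option Int)) (n : Int) (hn : ¬ n < 1) (j : Nat) :
    (spread_none_with_n_step list_ n).length = list_.length ∧
    ((spread_none_with_n_step list_ n)[j]? =
      if pvCov list_ n j = true ∧ j < list_.length then some none else list_[j]?) := by
  have key : spread_none_with_n_step list_ n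
      = ((PySem.List.pyRange 0 (list_.length : Int) 1).filter
          (fun i => decide (PySem.List.pyGetD list_ i (some 0) = none))).foldl
            (pvAssignA n) list_ := by
    simp only [spread_none_with_n_step, if_neg hn]
    rw [PySem.List.foldl_append_ite_eq_filter]
    rfl
  set S := (PySem.List.pyRange 0 (list_.length : Int) 1).filter
      (fun i => decide (PySem.List.pyGetD list_ i (some 0) = none)) with hS
  have hmem : ∀ i ∈ S, 0 ≤ i ∧ i < (list_.length : Int) := by
    intro i hi
    have h := (List.mem_filter.mp hi).1
    rw [PySem.List.mem_pyRange_one] at h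
    exact h
  obtain ⟨h1, h2⟩ := foldA n hn S list_ hmem
  have hiff : (∃ i ∈ S, i - n ≤ (j : Int) ∧ (j : Int) ≤ i + n) ↔ pvCov list_ n j = true := by
    rw [pvCov_iff]
    constructor
    · rintro ⟨i, hiS, hj1, hj2⟩
      obtain ⟨hir, hinone⟩ := List.mem_filter.mp hiS
      rw [PySem.List.mem_pyRange_one] at hir
      have hnone := of_decide_eq_true hinone
      rw [PySem.List.pyGetD_eq_getElem list_ (some 0) (by omega) (by omega)] at hnone
      refine ⟨i.toNat, by omega, ?_, by omega, by omega⟩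
      rw [List.getElem?_eq_getElem (by omega), hnone]
    · rintro ⟨k, hk, hknone, h1', h2'⟩
      rw [List.getElem?_eq_getElem hk] at hknone
      refine ⟨(k : Int), List.mem_filter.mpr ⟨?_, ?_⟩, by omega, by omega⟩
      · rw [PySem.List.mem_pyRange_one]; exact ⟨by omega, by omega⟩
      · apply decide_eq_true
        rw [PySem.List.pyGetD_eq_getElem list_ (some 0) (by omega) (by omega)]
        simpa using Option.some.inj hknone
  rw [key]
  refine ⟨h1, ?_⟩
  rw [h2 j]
  simp only [hiff]

-- B side: characterisation of the prefix sums of the difference array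
lemma foldDiff (list_ : List (Option Int)) (n : Int) (hn : ¬ n < 1) :
    ∀ (ps : List (Int × Option Int)) (d : List Int),
      d.length = list_.length + 1 →
      (∀ p ∈ ps, 0 ≤ p.1 ∧ p.1 < (list_.length : Int)) →
      (ps.foldl (fun d p => if p.2 = none then
          pvBump (pvBump d (max 0 (p.1 - n)).toNat 1) (min (list_.length : Int) (p.1 + n + 1)).toNat (-1)
        else d) d).length = d.length ∧
      ∀ s : Nat,
        pvPS (ps.foldl (fun d p => if p.2 = none then
          pvBump (pvBump d (max 0 (p.1 - n)).toNat 1) (min (list_.length : Int) (p.1 + n + 1)).toNat (-1)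
        else d) d) s
        = pvPS d s + (ps.countP (fun p => p.2 == none
            && decide ((max 0 (p.1 - n)).toNat < s)
            && !decide ((min (list_.length : Int) (p.1 + n + 1)).toNat < s)) : Int) := by
  intro ps
  induction ps with
  | nil => intro d hd hmem; simp
  | cons p ps ih =>
    intro d hd hmem
    have hp := hmem p (List.mem_cons_self ..)
    have hrest : ∀ q ∈ ps, 0 ≤ q.1 ∧ q.1 < (list_.length : Int) :=
      fun q hq => hmem q (List.mem_cons_of_mem _ hq)
    by_cases hp2 : p.2 = none
    · simp only [List.foldl_cons]
      rw [if_pos hp2]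
      have ha : (max 0 (p.1 - n)).toNat < d.length := by omega
      have hb : (min (list_.length : Int) (p.1 + n + 1)).toNat < d.length := by omega
      have hab : (max 0 (p.1 - n)).toNat ≤ (min (list_.length : Int) (p.1 + n + 1)).toNat := by
        omega
      obtain ⟨ihl, ihs⟩ := ih (pvBump (pvBump d (max 0 (p.1 - n)).toNat 1)
        (min (list_.length : Int) (p.1 + n + 1)).toNat (-1))
        (by rw [pvBump_length, pvBump_length, hd]) hrest
      refine ⟨by rw [ihl, pvBump_length, pvBump_length], ?_⟩
      intro s
      rw [ihs s,
        pvPS_bump _ _ _ (by rw [pvBump_length]; exact hb) s,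
        pvPS_bump _ _ _ ha s, List.countP_cons]
      simp only [hp2, BEq.rfl, Bool.true_and, Bool.and_eq_true, decide_eq_true_eq,
        Bool.not_eq_eq_eq_not, Bool.not_true, decide_eq_false_iff_not]
      push_cast
      split_ifs <;> omega
    · simp only [List.foldl_cons]
      rw [if_neg hp2]
      obtain ⟨ihl, ihs⟩ := ih d hd hrest
      refine ⟨ihl, ?_⟩
      intro s
      rw [ihs s, List.countP_cons]
      have : (p.2 == none) = false := beq_eq_false_iff_ne.mpr hp2
      simp [this]

lemma foldOut (diff : List Int) :
    ∀ (xs : List (Option Int)) (s : Nat) (out0 : List (Option Int)),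
      ((PySem.List.enumerate xs (s : Int)).foldl
        (fun st p =>
          let acc := st.1 + diff.getD p.1.toNat 0
          (acc, st.2 ++ [if acc > 0 then none else p.2]))
        (pvPS diff s, out0)).2
      = out0 ++ (PySem.List.enumerate xs (s : Int)).map
          (fun p => if 0 < pvPS diff (p.1.toNat + 1) then none else p.2) := by
  intro xs
  induction xs with
  | nil => intro s out0; simp [PySem.List.enumerate_nil]
  | cons x xs ih =>
    intro s out0
    rw [PySem.List.enumerate_cons, List.foldl_cons, List.map_cons]
    simp only [Int.toNat_natCast]
    rw [← pvPS_succ, show (s : Int) + 1 = ((s + 1 : Nat) : Int) by push_cast; ring,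
      ih (s + 1)]
    simp

lemma foldOut_zero (diff : List Int) (xs : List (Option Int)) :
    ((PySem.List.enumerate xs (0 : Int)).foldl
        (fun st p =>
          let acc := st.1 + diff.getD p.1.toNat 0
          (acc, st.2 ++ [if acc > 0 then none else p.2]))
        ((0 : Int), ([] : List (Option Int)))).2
      = (PySem.List.enumerate xs (0 : Int)).map
          (fun p => if 0 < pvPS diff (p.1.toNat + 1) then none else p.2) := by
  have h := foldOut diff xs 0 []
  simpa [pvPS] using h

lemma B_eq_map (list_ : List (Option Int)) (n : Int) (hn : ¬ n < 1) (j : Nat) :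
    (spread_none_with_n_step_alt list_ n).length = list_.length ∧
    (j < list_.length → ∃ hj : j < list_.length, (spread_none_with_n_step_alt list_ n)[j]? =
      some (if pvCov list_ n j = true then none else list_[j])) := by
  simp only [spread_none_with_n_step_alt, if_neg hn]
  rw [foldOut_zero]
  have hmemE : ∀ p ∈ PySem.List.enumerate list_ (0 : Int), 0 ≤ p.1 ∧ p.1 < (list_.length : Int) := by
    intro p hp
    rw [PySem.List.mem_enumerate_iff] at hp
    obtain ⟨k, hk, rfl⟩ := hp
    simp [hk]
  obtain ⟨hdl, hdps⟩ := foldDiff list_ n hn (PySem.List.enumerate list_ 0)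
    (List.replicate (list_.length + 1) 0) (by simp) hmemE
  refine ⟨by simp, ?_⟩
  intro hj
  refine ⟨hj, ?_⟩
  have hcov : (0 < pvPS ((PySem.List.enumerate list_ 0).foldl
      (fun d p => if p.2 = none then
          pvBump (pvBump d (max 0 (p.1 - n)).toNat 1)
            (min (list_.length : Int) (p.1 + n + 1)).toNat (-1)
        else d)
      (List.replicate (list_.length + 1) 0)) (j + 1)) ↔ pvCov list_ n j = true := by
    rw [hdps (j + 1), pvPS_replicate_zero, zero_add, Int.natCast_pos, List.countP_pos_iff,
      pvCov_iff]
    constructor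
    · rintro ⟨p, hp, hpred⟩
      rw [PySem.List.mem_enumerate_iff] at hp
      obtain ⟨k, hk, rfl⟩ := hp
      simp only [Bool.and_eq_true, beq_iff_eq, decide_eq_true_eq, Bool.not_eq_eq_eq_not,
        Bool.not_true, decide_eq_false_iff_not] at hpred
      refine ⟨k, hk, ?_, by omega, by omega⟩
      rw [List.getElem?_eq_getElem hk, hpred.1.1]
    · rintro ⟨k, hk, hkn, h1, h2⟩
      rw [List.getElem?_eq_getElem hk] at hkn
      refine ⟨((0 : Int) + k, list_[k]), ?_, ?_⟩
      · rw [PySem.List.mem_enumerate_iff]; exact ⟨k, hk, rfl⟩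
      · simp only [Bool.and_eq_true, beq_iff_eq, decide_eq_true_eq, Bool.not_eq_eq_eq_not,
          Bool.not_true, decide_eq_false_iff_not]
        exact ⟨⟨Option.some.inj hkn, by omega⟩, by omega⟩
  rw [List.getElem?_map, PySem.List.getElem?_enumerate, List.getElem?_eq_getElem hj]
  simp only [Option.map_some]
  rw [show ((0 : Int) + (j : Nat)).toNat = j by omega]
  by_cases hc : pvCov list_ n j = true
  · rw [if_pos (hcov.mpr hc), if_pos hc]
  · rw [if_neg (fun h => hc (hcov.mp h)), if_neg hc]

-- ===== VERDICT (by name: the statement is the Claim_ definition above) =====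
theorem spread_none_with_n_step_spec : Claim_equal_spread_none_with_n_step := by
  intro list_ n _
  unfold Spec_spread_none_with_n_step
  by_cases hn : n < 1
  · simp [spread_none_with_n_step, spread_none_with_n_step_alt, hn]
  · apply List.ext_getElem?
    intro j
    obtain ⟨hAl, hAg⟩ := A_getElem? list_ n hn j
    obtain ⟨hBl, hBg⟩ := B_eq_map list_ n hn j
    by_cases hj : j < list_.length
    · obtain ⟨hj2, hBg'⟩ := hBg hj
      rw [hAg, hBg', List.getElem?_eq_getElem hj]
      by_cases hc : pvCov list_ n j = true
      · rw [if_pos ⟨hc, hj⟩, if_pos hc]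
      · rw [if_neg (fun h => hc h.1), if_neg hc]
    · rw [hAg, if_neg (fun h => hj h.2),
        List.getElem?_eq_none (by omega : list_.length ≤ j),
        List.getElem?_eq_none (by rw [hBl]; omega)]
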